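-- pv_equiv track=rewrite | github.com/DestinE-Climate-DT/Workflow | utils/update_template_scripts.py | get_current_line_indices_and_function_paths
-- ===== SOURCE A (Python) =====
-- def get_current_line_indices_and_function_paths(
--     line_idx, line_indices_and_function_paths
-- ):
--     for chunk in line_indices_and_function_paths:
--         for idx, function_path, function_name in chunk:
--             if line_idx == idx:
--                 return chunk
--     return None
-- ===== SOURCE B (Python) =====
-- def get_current_line_indices_and_function_paths(
--     line_idx, line_indices_and_function_paths
-- ):
--     index = {}
--     for chunk in line_indices_and_function_paths:
--         for idx, function_path, function_name in chunk:
--             if idx not in index: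
--                 index[idx] = chunk
--     return index.get(line_idx)
-- ===== Notes on version B (the rewrite author's own statement) =====
-- stated objective: alternative
-- what changed: Replaces the nested early-return scan with one pass that builds a first-wins dict mapping idx -> containing chunk, then a single dict lookup.
import Mathlib
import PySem

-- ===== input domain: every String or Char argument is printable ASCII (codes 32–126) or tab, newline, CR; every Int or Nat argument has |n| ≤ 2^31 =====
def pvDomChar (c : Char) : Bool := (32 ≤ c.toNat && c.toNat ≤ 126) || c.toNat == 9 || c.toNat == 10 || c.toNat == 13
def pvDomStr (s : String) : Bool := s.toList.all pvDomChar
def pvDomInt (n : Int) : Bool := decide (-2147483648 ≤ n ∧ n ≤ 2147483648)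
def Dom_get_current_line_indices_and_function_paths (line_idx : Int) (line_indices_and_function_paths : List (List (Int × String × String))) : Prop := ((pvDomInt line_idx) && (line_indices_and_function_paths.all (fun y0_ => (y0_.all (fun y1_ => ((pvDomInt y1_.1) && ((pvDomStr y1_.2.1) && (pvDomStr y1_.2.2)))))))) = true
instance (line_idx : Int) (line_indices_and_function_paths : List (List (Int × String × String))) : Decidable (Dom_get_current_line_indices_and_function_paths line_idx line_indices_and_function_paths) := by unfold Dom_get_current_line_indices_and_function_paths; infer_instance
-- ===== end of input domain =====

-- B builds a first-wins dict idx -> chunk in one pass and returns a single lookup (alternative decomposition; return value proved equal to A's).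

-- ===== PORT A =====
-- inner 'for idx, function_path, function_name in chunk: if line_idx == idx: return chunk'
def pvScanChunk (line_idx : Int) : List (Int × String × String) → Bool
  | [] => false
  | t :: ts => if line_idx == t.1 then true else pvScanChunk line_idx ts

def get_current_line_indices_and_function_paths (line_idx : Int) (line_indices_and_function_paths : List (List (Int × String × String))) : Option (List (Int × String × String)) :=
  match line_indices_and_function_paths with
  | [] => none
  | chunk :: rest =>
    if pvScanChunk line_idx chunk then some chunk
    else get_current_line_indices_and_function_paths line_idx rest

-- ===== PORT B =====
def get_current_line_indices_and_function_paths_alt (line_idx : Int) (line_indices_and_function_paths : List (List (Int × String × String))) : Option (List (Int × String × String)) :=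
  (line_indices_and_function_paths.foldl
    (fun index chunk =>
      chunk.foldl (fun index t => if index.contains t.1 then index else index.insert t.1 chunk) index)
    PySem.Dict.empty).get? line_idx

-- ===== PRECONDITION & SPEC =====
def Spec_get_current_line_indices_and_function_paths (line_idx : Int) (line_indices_and_function_paths : List (List (Int × String × String))) (out : Option (List (Int × String × String))) : Prop := out = get_current_line_indices_and_function_paths_alt line_idx line_indices_and_function_paths
instance (line_idx : Int) (line_indices_and_function_paths : List (List (Int × String × String))) (out : Option (List (Int × String × String))) : Decidable (Spec_get_current_line_indices_and_function_paths line_idx line_indices_and_function_paths out) := by unfold Spec_get_current_line_indices_and_function_paths; infer_instance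

-- ===== CLAIM (what is proved, stated in full; the proofs are below) =====
def Claim_equal_get_current_line_indices_and_function_paths : Prop := ∀ (line_idx : Int) (line_indices_and_function_paths : List (List (Int × String × String))), Dom_get_current_line_indices_and_function_paths line_idx line_indices_and_function_paths → Spec_get_current_line_indices_and_function_paths line_idx line_indices_and_function_paths (get_current_line_indices_and_function_paths line_idx line_indices_and_function_paths)

-- ===== LEMMAS AND PROOFS =====

-- one chunk's inner fold: first-wins insertion only fills the key if it was absent
theorem pv_inner_get? (k : Int) (v : List (Int × String × String))
    (l : List (Int × String × String)) (d : PySem.Dict Int (List (Int × String × String))) :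
    (l.foldl (fun (d : PySem.Dict Int (List (Int × String × String))) t =>
        if d.contains t.1 then d else d.insert t.1 v) d).get? k =
      if (d.get? k).isSome then d.get? k
      else if pvScanChunk k l then some v else none := by
  induction l generalizing d with
  | nil => simp [pvScanChunk]
  | cons t ts ih =>
    simp only [List.foldl_cons, pvScanChunk]
    by_cases hc : d.contains t.1 = true
    · rw [if_pos hc, ih]
      by_cases hk : (d.get? k).isSome
      · simp [hk]
      · have hkt : ¬ (k == t.1) = true := by
          intro h
          have : k = t.1 := by simpa using h
          subst this
          rw [PySem.Dict.contains_eq_isSome_get?] at hc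
          exact hk hc
        simp [hk, hkt]
    · rw [if_neg hc, ih]
      by_cases hkt : k = t.1
      · have hk : (d.get? k).isSome = false := by
          rw [← PySem.Dict.contains_eq_isSome_get?, hkt]; simpa using hc
        rw [hkt, PySem.Dict.get?_insert_self]
        have hk2 : (d.get? t.1).isSome = false := hkt ▸ hk
        simp [hk2]
      · rw [PySem.Dict.get?_insert_of_ne d v hkt]
        simp [hkt]

-- outer fold: the dict lookup equals A's first-match scan, modulo what is already in d
theorem pv_outer_get? (k : Int) (chunks : List (List (Int × String × String)))
    (d : PySem.Dict Int (List (Int × String × String))) :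
    (chunks.foldl
        (fun (index : PySem.Dict Int (List (Int × String × String))) chunk =>
          chunk.foldl (fun index t => if index.contains t.1 then index else index.insert t.1 chunk) index)
        d).get? k =
      if (d.get? k).isSome then d.get? k
      else get_current_line_indices_and_function_paths k chunks := by
  induction chunks generalizing d with
  | nil => simp [get_current_line_indices_and_function_paths]
  | cons c rest ih =>
    simp only [List.foldl_cons, get_current_line_indices_and_function_paths]
    rw [ih, pv_inner_get? k c c d]
    by_cases hk : (d.get? k).isSome
    · simp [hk]
    · by_cases hs : pvScanChunk k c
      · simp [hk, hs]
      · simp [hk, hs]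

-- ===== VERDICT (by name: the statement is the Claim_ definition above) =====
theorem get_current_line_indices_and_function_paths_spec : Claim_equal_get_current_line_indices_and_function_paths := by
  intro line_idx chunks _
  unfold Spec_get_current_line_indices_and_function_paths get_current_line_indices_and_function_paths_alt
  rw [pv_outer_get?]
  simp
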